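-- pv_equiv track=rewrite | github.com/JordanNazemi/TerpAnalysis | Models/knn-less-model.py | get_aroma_dict
-- ===== SOURCE A (Python) =====
-- def get_aroma_dict(df):
--     aroma_list = []
--     complete_list = []
--     for entry in df:
--         for aroma in entry:
--             if aroma not in aroma_list and aroma != "":
--                 aroma_list.append(aroma)
--             complete_list.append(aroma)
--
--     aroma_dict = {}
--     for aroma in aroma_list:
--         for entry in complete_list:
--             if entry == aroma:
--                 if aroma in aroma_dict:
--                     aroma_dict[aroma] = aroma_dict[aroma] + 1
--                 else:
--                     aroma_dict[aroma] = 1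
--
--     return aroma_dict
-- ===== SOURCE B (Python) =====
-- def get_aroma_dict(df):
--     aroma_dict = {}
--     for entry in df:
--         for aroma in entry:
--             if aroma != "":
--                 aroma_dict[aroma] = aroma_dict.get(aroma, 0) + 1
--     return aroma_dict
-- ===== Notes on version B (the rewrite author's own statement) =====
-- stated objective: faster
-- what changed: Replaced A's two-phase build-dedup-list-then-rescan-everything-per-key counting with a single pass that increments a counter dict as each nonempty aroma is seen.
import Mathlib
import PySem

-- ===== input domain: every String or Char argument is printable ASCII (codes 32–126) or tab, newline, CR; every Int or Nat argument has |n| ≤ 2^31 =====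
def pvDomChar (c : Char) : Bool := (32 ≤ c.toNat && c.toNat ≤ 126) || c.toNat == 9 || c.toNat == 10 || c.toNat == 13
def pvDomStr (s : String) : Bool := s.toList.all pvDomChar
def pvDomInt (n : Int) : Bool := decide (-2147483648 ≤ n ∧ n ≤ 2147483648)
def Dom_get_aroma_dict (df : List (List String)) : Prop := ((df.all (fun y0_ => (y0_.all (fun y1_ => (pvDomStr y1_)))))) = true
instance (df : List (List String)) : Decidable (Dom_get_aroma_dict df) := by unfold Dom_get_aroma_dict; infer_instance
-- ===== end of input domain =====

-- B replaces A's dedup-then-rescan-per-key counting by a single counting pass over the aromas (faster).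

-- ===== PORT A =====
-- phase-2 inner loop body: 'for entry in complete_list: if entry == aroma: …'
def pvInnerA (aroma : String) (d : PySem.Dict String Int) (entry : String) : PySem.Dict String Int :=
  if entry = aroma then
    if d.contains aroma then d.insert aroma (d.getD aroma 0 + 1)
    else d.insert aroma 1
  else d

def get_aroma_dict (df : List (List String)) : List (String × Int) :=
  let p := df.foldl (fun (p : List String × List String) entry =>
      entry.foldl (fun (p : List String × List String) aroma =>
        ((if (!p.1.contains aroma) && aroma ≠ "" then p.1 ++ [aroma] else p.1),
         p.2 ++ [aroma])) p) ([], [])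
  let aroma_list := p.1
  let complete_list := p.2
  let aroma_dict := aroma_list.foldl (fun d aroma =>
      complete_list.foldl (pvInnerA aroma) d) PySem.Dict.empty
  aroma_dict.items

-- ===== PORT B =====
def get_aroma_dict_alt (df : List (List String)) : List (String × Int) :=
  (df.foldl (fun d entry =>
      entry.foldl (fun (d : PySem.Dict String Int) aroma =>
        if aroma ≠ "" then d.insert aroma (d.getD aroma 0 + 1) else d) d)
    PySem.Dict.empty).items

-- ===== PRECONDITION & SPEC =====
def Spec_get_aroma_dict (df : List (List String)) (out : List (String × Int)) : Prop := out = get_aroma_dict_alt df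
instance (df : List (List String)) (out : List (String × Int)) : Decidable (Spec_get_aroma_dict df out) := by unfold Spec_get_aroma_dict; infer_instance

-- ===== CLAIM (what is proved, stated in full; the proofs are below) =====
def Claim_equal_get_aroma_dict : Prop := ∀ (df : List (List String)), Dom_get_aroma_dict df → Spec_get_aroma_dict df (get_aroma_dict df)

-- ===== LEMMAS AND PROOFS =====

-- a nested fold over a list of lists is a fold over the flattened list
theorem pv_foldl_flat {α β : Type} (df : List (List α)) (f : β → α → β) (b : β) :
    df.foldl (fun b e => e.foldl f b) b = (df.flatMap id).foldl f b := by
  induction df generalizing b with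
  | nil => rfl
  | cons e df ih => simp [List.foldl_append, ih]

-- a guarded fold is a fold over the filtered list
theorem pv_foldl_guard {α β : Type} (p : α → Prop) [DecidablePred p] (f : β → α → β)
    (l : List α) (b : β) :
    l.foldl (fun b a => if p a then f b a else b) b
      = (l.filter (fun a => decide (p a))).foldl f b := by
  induction l generalizing b with
  | nil => rfl
  | cons a l ih =>
    by_cases h : p a <;> simp [h, ih]

-- foldl of Set.add is Set.update
theorem pv_foldl_add {α : Type} [BEq α] [LawfulBEq α] (l : List α) (s : List α) :
    l.foldl PySem.Set.add s = PySem.Set.update s l := by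
  induction l generalizing s with
  | nil => rw [List.foldl_nil, PySem.Set.update_nil]
  | cons a l ih => rw [List.foldl_cons, ih, PySem.Set.update_cons]

-- A's phase-1 pair fold, componentwise
theorem pv_pair_fold (xs : List String) (al cl : List String) :
    xs.foldl (fun (p : List String × List String) aroma =>
        ((if (!p.1.contains aroma) && aroma ≠ "" then p.1 ++ [aroma] else p.1), p.2 ++ [aroma])) (al, cl)
      = (xs.foldl (fun al aroma => if (!al.contains aroma) && aroma ≠ "" then al ++ [aroma] else al) al,
         cl ++ xs) := by
  induction xs generalizing al cl with
  | nil => simp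
  | cons a xs ih => simp only [List.foldl_cons]; rw [ih]; simp

-- A's aroma_list accumulation step is Set.add guarded by nonemptiness
theorem pv_al_step (al : List String) (a : String) :
    (if (!al.contains a) && a ≠ "" then al ++ [a] else al)
      = if a ≠ "" then PySem.Set.add al a else al := by
  by_cases h : a = "" <;> by_cases hm : a ∈ al <;>
    simp [h, hm, PySem.Set.add]

-- phase 1 from the empty list builds the ordered dedup of the nonempty aromas
theorem pv_aroma_list (xs : List String) :
    xs.foldl (fun al aroma => if (!al.contains aroma) && aroma ≠ "" then al ++ [aroma] else al) []
      = PySem.Set.ofList (xs.filter (fun a => a ≠ "")) := by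
  have hfg : (fun (al : List String) a => if (!al.contains a) && a ≠ "" then al ++ [a] else al)
      = (fun (al : List String) a => if a ≠ "" then PySem.Set.add al a else al) :=
    funext fun al => funext fun a => pv_al_step al a
  rw [hfg, pv_foldl_guard (fun a => a ≠ "") PySem.Set.add, pv_foldl_add,
      PySem.Set.update_nil_left]

-- A's inner rescan over l, for a fixed aroma a, adds l.count a to a's entry (inserting if new)
theorem pv_inner (a : String) (l : List String) (d : PySem.Dict String Int) :
    l.foldl (pvInnerA a) d
      = if l.count a = 0 then d else d.insert a (d.getD a 0 + (l.count a : Int)) := by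
  induction l generalizing d with
  | nil => simp
  | cons e l ih =>
    by_cases he : e = a
    · subst he
      have hstep : pvInnerA e d e = d.insert e (d.getD e 0 + 1) := by
        by_cases hc : d.contains e
        · simp [pvInnerA, hc]
        · have h0 : d.getD e 0 = 0 :=
            PySem.Dict.getD_of_not_contains d 0 (by simpa using hc)
          simp [pvInnerA, hc, h0]
      rw [List.foldl_cons, hstep, ih]
      by_cases h0 : l.count e = 0
      · simp [h0, List.count_cons_self]
      · have : (l.count e : Int) ≠ 0 := by exact_mod_cast h0
        rw [if_neg h0, if_neg (by simp [List.count_cons_self]),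
            PySem.Dict.insert_insert_self, PySem.Dict.getD_insert_self]
        congr 1
        push_cast [List.count_cons_self]
        ring
    · have hstep : pvInnerA a d e = d := by simp [pvInnerA, he]
      rw [List.foldl_cons, hstep, ih, List.count_cons_of_ne (by simpa using he)]

-- A's phase 2 over a nodup list of fresh keys, each occurring in xs, appends one item per key
theorem pv_outer (xs : List String) (l : List String) (d : PySem.Dict String Int)
    (hnd : l.Nodup) (hfresh : ∀ a ∈ l, d.contains a = false)
    (hcnt : ∀ a ∈ l, xs.count a ≠ 0) :
    (l.foldl (fun d aroma => xs.foldl (pvInnerA aroma) d) d).items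
      = d.items ++ l.map (fun a => (a, (xs.count a : Int))) := by
  induction l generalizing d with
  | nil => simp
  | cons a l ih =>
    rw [List.foldl_cons, pv_inner, if_neg (hcnt a (by simp)),
        PySem.Dict.getD_of_not_contains d 0 (hfresh a (by simp))]
    have hfresh' : ∀ b ∈ l,
        (d.insert a (0 + (xs.count a : Int))).contains b = false := by
      intro b hb
      rw [PySem.Dict.contains_insert]
      have hba : b ≠ a := by
        rintro rfl; exact (List.nodup_cons.mp hnd).1 hb
      simp [hba, hfresh b (List.mem_cons_of_mem _ hb)]
    rw [ih _ (List.Nodup.of_cons hnd) hfresh'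
        (fun b hb => hcnt b (List.mem_cons_of_mem _ hb))]
    rw [PySem.Dict.items_insert_of_not_contains (h := hfresh a (by simp))]
    simp

-- B's dict is Counter(nonempty aromas)
theorem pv_alt_counter (df : List (List String)) :
    get_aroma_dict_alt df
      = (PySem.Dict.counter (((df.flatMap id).filter (fun a => a ≠ "")) : List String)).items := by
  unfold get_aroma_dict_alt
  rw [pv_foldl_flat, pv_foldl_guard (fun a => a ≠ "")
        (fun (d : PySem.Dict String Int) aroma => d.insert aroma (d.getD aroma 0 + 1)),
      PySem.Dict.foldl_insert_getD_add_one_eq_counter]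

-- ===== VERDICT (by name: the statement is the Claim_ definition above) =====
theorem get_aroma_dict_spec : Claim_equal_get_aroma_dict := by
  intro df _
  unfold Spec_get_aroma_dict
  set xs := df.flatMap id with hxs
  set ys := xs.filter (fun a => a ≠ "") with hys
  rw [pv_alt_counter, PySem.Dict.items_counter]
  unfold get_aroma_dict
  rw [pv_foldl_flat, pv_pair_fold, ← hxs]
  simp only [List.nil_append]
  rw [pv_aroma_list, ← hys]
  rw [pv_outer xs (PySem.Set.ofList ys) PySem.Dict.empty
        (PySem.Set.nodup_ofList ys)
        (fun a _ => PySem.Dict.contains_empty a)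
        (fun a ha => by
          have hay : a ∈ ys := (PySem.Set.mem_ofList _ _).mp ha
          have : a ∈ xs := List.mem_of_mem_filter hay
          simpa [List.count_pos_iff] using List.count_pos_iff.mpr this |>.ne')]
  have hemp : (PySem.Dict.empty : PySem.Dict String Int).items = [] := rfl
  rw [hemp]
  simp only [List.nil_append]
  apply List.map_congr_left
  intro a ha
  have hay : a ∈ ys := (PySem.Set.mem_ofList ys a).mp ha
  have hne : a ≠ "" := by
    have := (List.mem_filter.mp hay).2; simpa using this
  have : ys.count a = xs.count a := by
    rw [hys]; exact List.count_filter (by simpa using hne)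
  rw [this]
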